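-- pv_equiv track=rewrite | github.com/dillon4287/CodeProjects | Python/Bible software/base_structure_classes.py | insertPeriod
-- ===== SOURCE A (Python) =====
-- import string
--
-- def insertPeriod(input):
--     index = -1
--     for i in input:
--         index += 1
--         if i in string.digits:
--             input = input[:index] + "." + input[index:]
--             break
--     return input
-- ===== SOURCE B (Python) =====
-- import re
--
-- def insertPeriod(input):
--     # Delegate the first-ASCII-digit search to the regex engine:
--     # substitute the first [0-9] match by '.' followed by the digit.
--     return re.sub(r'([0-9])', r'.\1', input, count=1)
-- ===== Notes on version B (the rewrite author's own statement) =====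
-- stated objective: idiomatic
-- what changed: Replaces the manual index-counting loop with break and slice-concatenation by a single re.sub with an ASCII [0-9] class and count=1, delegating the first-digit search and the insertion to the regex engine.
import Mathlib
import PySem

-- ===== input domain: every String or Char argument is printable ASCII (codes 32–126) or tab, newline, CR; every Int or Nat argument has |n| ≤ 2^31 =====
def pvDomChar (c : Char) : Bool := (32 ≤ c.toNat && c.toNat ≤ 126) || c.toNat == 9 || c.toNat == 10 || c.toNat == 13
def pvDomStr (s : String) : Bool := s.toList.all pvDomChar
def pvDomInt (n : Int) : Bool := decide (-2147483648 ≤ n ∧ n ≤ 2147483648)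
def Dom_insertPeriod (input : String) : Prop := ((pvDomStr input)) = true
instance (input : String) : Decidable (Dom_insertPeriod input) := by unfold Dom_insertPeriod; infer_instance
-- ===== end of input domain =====

-- B replaces A's manual index-counting loop (with break and slice concatenation) by a single
-- regex substitution re.sub(r'([0-9])', r'.\1', input, count=1); return values proved equal.

-- ===== PORT A =====
-- the for-loop with the running index and the break: recursion over the remaining characters,
-- carrying the original string and the index (starts at -1, '+= 1' at the top of the body)
def insertPeriodLoop (input : String) (chars : List Char) (index : Int) : String :=
  match chars with
  | [] => input
  | c :: rest =>
    let index := index + 1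
    if ("0123456789".toList.contains c) then      -- i in string.digits (single char membership)
      -- input[:index] + "." + input[index:]  then break
      String.ofList (PySem.List.slice input.toList none (some index) ++
                 '.' :: PySem.List.slice input.toList (some index) none)
    else
      insertPeriodLoop input rest index

def insertPeriod (input : String) : String :=
  insertPeriodLoop input input.toList (-1)

-- ===== PORT B =====
-- re.sub(r'([0-9])', r'.\1', input, count=1): scan left to right, replace the FIRST character
-- matching the ASCII class [0-9] by '.' followed by that character, leave everything else as is
def subFirstDigit (cs : List Char) : List Char :=
  match cs with
  | [] => []
  | c :: rest =>
    if ('0' ≤ c && c ≤ '9') then '.' :: c :: rest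
    else c :: subFirstDigit rest

def insertPeriod_alt (input : String) : String :=
  String.ofList (subFirstDigit input.toList)

-- ===== PRECONDITION & SPEC =====
def Spec_insertPeriod (input : String) (out : String) : Prop := out = insertPeriod_alt input
instance (input : String) (out : String) : Decidable (Spec_insertPeriod input out) := by unfold Spec_insertPeriod; infer_instance

-- ===== CLAIM (what is proved, stated in full; the proofs are below) =====
def Claim_equal_insertPeriod : Prop := ∀ (input : String), Dom_insertPeriod input → Spec_insertPeriod input (insertPeriod input)

-- ===== LEMMAS AND PROOFS =====

-- membership in "0123456789" is exactly the [0-9] range test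
set_option maxRecDepth 4000 in
theorem digits_contains_eq (c : Char) :
    ("0123456789".toList.contains c) = (('0' ≤ c : Bool) && (c ≤ '9' : Bool)) := by
  show ((['0','1','2','3','4','5','6','7','8','9'] : List Char).contains c) = _
  rw [Bool.eq_iff_iff]
  simp only [List.contains, List.elem_eq_mem, List.mem_cons, List.not_mem_nil, or_false,
    decide_eq_true_eq, Bool.and_eq_true, Char.le_def, Char.ext_iff, UInt32.ext_iff,
    UInt32.le_iff_toNat_le,
    show ('0':Char).val.toNat = 48 from rfl, show ('1':Char).val.toNat = 49 from rfl,
    show ('2':Char).val.toNat = 50 from rfl, show ('3':Char).val.toNat = 51 from rfl,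
    show ('4':Char).val.toNat = 52 from rfl, show ('5':Char).val.toNat = 53 from rfl,
    show ('6':Char).val.toNat = 54 from rfl, show ('7':Char).val.toNat = 55 from rfl,
    show ('8':Char).val.toNat = 56 from rfl, show ('9':Char).val.toNat = 57 from rfl]
  omega

-- loop invariant: the remaining characters are a suffix, index+1 = length of the scanned prefix
theorem loop_eq (cs pre : List Char) :
    insertPeriodLoop (String.ofList (pre ++ cs)) cs ((pre.length : Int) - 1) =
      String.ofList (pre ++ subFirstDigit cs) := by
  induction cs generalizing pre with
  | nil => simp [insertPeriodLoop, subFirstDigit]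
  | cons c rest ih =>
    rw [insertPeriodLoop, subFirstDigit, digits_contains_eq]
    have hidx : (pre.length : Int) - 1 + 1 = (pre.length : Int) := by omega
    by_cases h : (('0' ≤ c : Bool) && (c ≤ '9' : Bool)) = true
    · simp only [h, hidx]
      rw [String.toList_ofList, PySem.List.slice_to_natCast, PySem.List.slice_from_natCast]
      simp
    · simp only [Bool.not_eq_true] at h
      simp only [h, Bool.false_eq_true, if_false, hidx]
      have harr : pre ++ c :: rest = (pre ++ [c]) ++ rest := by simp
      have hlen : (pre.length : Int) = ((pre ++ [c]).length : Int) - 1 := by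
        simp
      rw [harr, hlen, ih (pre ++ [c])]
      simp

-- ===== VERDICT (by name: the statement is the Claim_ definition above) =====
theorem insertPeriod_spec : Claim_equal_insertPeriod := by
  intro input _
  show insertPeriod input = insertPeriod_alt input
  unfold insertPeriod insertPeriod_alt
  have h0 : input = String.ofList (([] : List Char) ++ input.toList) := by
    simp
  calc insertPeriodLoop input input.toList (-1)
      = insertPeriodLoop (String.ofList (([] : List Char) ++ input.toList)) input.toList
          ((([] : List Char).length : Int) - 1) := by rw [← h0]; norm_num
    _ = String.ofList (([] : List Char) ++ subFirstDigit input.toList) := loop_eq _ _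
    _ = String.ofList (subFirstDigit input.toList) := by simp
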